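-- pv_equiv track=rewrite | github.com/LLNL/axom | src/axom/mir/scripts/clip_table_generator_hexahedron.py | isHexCaseFive
-- ===== SOURCE A (Python) =====
-- def getAdjacentVertices( vertex ):
--     if vertex == 0:
--         return [1,3,4]
--     elif vertex == 1:
--         return [0,2,5]
--     elif vertex == 2:
--         return [1,3,6]
--     elif vertex == 3:
--         return [0,2,7]
--     elif vertex == 4:
--         return [0,5,7]
--     elif vertex == 5:
--         return [1,4,6]
--     elif vertex == 6:
--         return [2,5,7]
--     elif vertex == 7:
--         return [3,4,6]
--
-- def isHexCaseFive( onBits, offBits ):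
--     if len( onBits ) == 2 or len( offBits ) == 2:
--         if len( onBits ) == 2:
--             clipBits = onBits
--             nonClipBits = offBits
--         else:
--             clipBits = offBits
--             nonClipBits = onBits
--
--         # Ensure that the two clip vertices are not adjacent
--         v0AdjacentVertices = getAdjacentVertices( clipBits[0] )
--         if clipBits[1] in v0AdjacentVertices:
--             return False
--
--         # Ensure the clip bits share some adjacent vertices
--         v1AdjacentVertices = getAdjacentVertices( clipBits[1] )
--
--         for v0a in v0AdjacentVertices:
--             for v1a in v1AdjacentVertices:
--                 if v0a == v1a:
--                     return True
--         return False
--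
--     else:
--         return False
-- ===== SOURCE B (Python) =====
-- # Gray-code formulation: each hex vertex gets its 3-bit cube coordinate code;
-- # the pair is "case five" iff the XOR of the codes has even popcount
-- # (Hamming distance 0 or 2), replacing the adjacency lists and nested scan.
-- _CODE = {0: 0, 1: 4, 2: 6, 3: 2, 4: 1, 5: 5, 6: 7, 7: 3}
--
-- def isHexCaseFive(onBits, offBits):
--     if len(onBits) == 2:
--         clipBits = onBits
--     elif len(offBits) == 2:
--         clipBits = offBits
--     else:
--         return False
--     x = _CODE[clipBits[0]] ^ _CODE[clipBits[1]]
--     return bin(x).count('1') % 2 == 0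
-- ===== Notes on version B (the rewrite author's own statement) =====
-- stated objective: simpler
-- what changed: Replaces the per-vertex adjacency lists, the adjacency membership test and the nested shared-neighbour scan by mapping each vertex to its 3-bit cube-coordinate code and testing whether the XOR of the two clip vertices' codes has even popcount.
import Mathlib
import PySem

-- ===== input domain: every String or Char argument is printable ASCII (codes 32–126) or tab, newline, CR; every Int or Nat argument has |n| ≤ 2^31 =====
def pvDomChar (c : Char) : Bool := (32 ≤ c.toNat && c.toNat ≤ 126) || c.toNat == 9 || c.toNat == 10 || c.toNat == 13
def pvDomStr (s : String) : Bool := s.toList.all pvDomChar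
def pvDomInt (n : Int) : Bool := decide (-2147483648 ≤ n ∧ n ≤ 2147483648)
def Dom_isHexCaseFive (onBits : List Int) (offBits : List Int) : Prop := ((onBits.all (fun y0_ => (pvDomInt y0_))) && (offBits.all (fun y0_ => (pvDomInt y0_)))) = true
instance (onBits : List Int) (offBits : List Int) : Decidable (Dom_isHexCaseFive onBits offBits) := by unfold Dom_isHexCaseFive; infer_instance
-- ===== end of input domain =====

-- B replaces the adjacency-list lookups and nested shared-neighbour scan by a
-- cube-coordinate code table and a popcount-parity test on the XOR of the two
-- clip vertices' codes (objective: simpler).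


-- ===== PORT A =====
-- Python's getAdjacentVertices returns None for a vertex outside 0..7: Option here.
def getAdjacentVertices (vertex : Int) : Option (List Int) :=
  if vertex = 0 then some [1,3,4]
  else if vertex = 1 then some [0,2,5]
  else if vertex = 2 then some [1,3,6]
  else if vertex = 3 then some [0,2,7]
  else if vertex = 4 then some [0,5,7]
  else if vertex = 5 then some [1,4,6]
  else if vertex = 6 then some [2,5,7]
  else if vertex = 7 then some [3,4,6]
  else none

def isHexCaseFive (onBits : List Int) (offBits : List Int) : Bool :=
  if onBits.length == 2 || offBits.length == 2 then
    let clipBits := if onBits.length == 2 then onBits else offBits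
    match PySem.List.pyGet? clipBits 0, PySem.List.pyGet? clipBits 1 with
    | some c0, some c1 =>
      match getAdjacentVertices c0 with
      | none => false  -- Python raises TypeError here ('in None'); outside Pre_
      | some v0Adj =>
        if v0Adj.contains c1 then false
        else
          match getAdjacentVertices c1 with
          | none => false  -- Python raises TypeError here ('for … in None'); outside Pre_
          | some v1Adj =>
            v0Adj.any (fun v0a => v1Adj.any (fun v1a => v0a == v1a))
    | _, _ => false  -- unreachable: length is 2
  else false

-- ===== PORT B =====
-- Source B's _CODE dict, as an association list (Python dict of int literals).
def hexCode : PySem.Dict Int Int :=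
  PySem.Dict.ofList [(0, 0), (1, 4), (2, 6), (3, 2), (4, 1), (5, 5), (6, 7), (7, 3)]

-- port of bin(x).count('1') for a nonnegative x: number of ones in binary
-- (structural recursion on a fuel bound so the kernel can evaluate it)
def popcountAux : Nat → Nat → Nat
  | 0, _ => 0
  | fuel + 1, n => if n = 0 then 0 else n % 2 + popcountAux fuel (n / 2)

def popcountNat (n : Nat) : Nat := popcountAux n n

-- `none` (out-of-range index or a key missing from _CODE, i.e. a Python
-- KeyError, outside Pre_) falls through to `false` via getD.
def isHexCaseFive_alt (onBits : List Int) (offBits : List Int) : Bool :=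
  let clip? : Option (List Int) :=
    if onBits.length == 2 then some onBits
    else if offBits.length == 2 then some offBits
    else none
  (clip?.bind fun clipBits =>
    (PySem.List.pyGet? clipBits 0).bind fun c0 =>
    (PySem.List.pyGet? clipBits 1).bind fun c1 =>
    (PySem.Dict.get? hexCode c0).bind fun k0 =>
    (PySem.Dict.get? hexCode c1).map fun k1 =>
      -- codes are nonnegative (0..7), so Nat xor is exact here
      popcountNat (k0.toNat ^^^ k1.toNat) % 2 == 0).getD false

-- ===== PRECONDITION & SPEC =====
-- Pre_ excludes exactly the inputs where A raises TypeError: a chosen clip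
-- list containing a vertex outside 0..7 (getAdjacentVertices returns None).
def Pre_isHexCaseFive (onBits : List Int) (offBits : List Int) : Prop :=
  if onBits.length = 2 then ∀ v ∈ onBits, 0 ≤ v ∧ v < 8
  else if offBits.length = 2 then ∀ v ∈ offBits, 0 ≤ v ∧ v < 8
  else True
instance (onBits : List Int) (offBits : List Int) : Decidable (Pre_isHexCaseFive onBits offBits) := by unfold Pre_isHexCaseFive; infer_instance

def pvWitness_isHexCaseFive : List Int × List Int := ([0, 6], [1, 2, 3, 4, 5, 7])

def Spec_isHexCaseFive (onBits : List Int) (offBits : List Int) (out : Bool) : Prop := out = isHexCaseFive_alt onBits offBits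
instance (onBits : List Int) (offBits : List Int) (out : Bool) : Decidable (Spec_isHexCaseFive onBits offBits out) := by unfold Spec_isHexCaseFive; infer_instance

-- ===== CLAIM =====
def Claim_equal_isHexCaseFive : Prop := ∀ (onBits : List Int) (offBits : List Int), Dom_isHexCaseFive onBits offBits → Pre_isHexCaseFive onBits offBits → Spec_isHexCaseFive onBits offBits (isHexCaseFive onBits offBits)

-- ===== LEMMAS AND PROOFS =====
-- core agreement on a length-2 clip list with in-range vertices, checked over all 64 pairs
theorem core_on (a b : Int) (off : List Int)
    (ha0 : 0 ≤ a) (ha8 : a < 8) (hb0 : 0 ≤ b) (hb8 : b < 8) :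
    isHexCaseFive [a, b] off = isHexCaseFive_alt [a, b] off := by
  simp only [isHexCaseFive, isHexCaseFive_alt, List.length_cons, List.length_nil,
    Nat.reduceAdd, BEq.rfl, Bool.true_or, if_true]
  interval_cases a <;> interval_cases b <;> decide

theorem core_off (a b : Int) (on : List Int) (hon : on.length ≠ 2)
    (ha0 : 0 ≤ a) (ha8 : a < 8) (hb0 : 0 ≤ b) (hb8 : b < 8) :
    isHexCaseFive on [a, b] = isHexCaseFive_alt on [a, b] := by
  have hon' : (on.length == 2) = false := by simpa using hon
  simp only [isHexCaseFive, isHexCaseFive_alt, hon', List.length_cons, List.length_nil,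
    Nat.reduceAdd, BEq.rfl, Bool.false_or, Bool.false_eq_true, if_true, if_false]
  interval_cases a <;> interval_cases b <;> decide

-- ===== VERDICT =====
theorem isHexCaseFive_spec : Claim_equal_isHexCaseFive := by
  intro onBits offBits _ hpre
  unfold Spec_isHexCaseFive
  by_cases hon : onBits.length = 2
  · obtain ⟨a, b, rfl⟩ := List.length_eq_two.mp hon
    simp only [Pre_isHexCaseFive, hon, if_true] at hpre
    have ha := hpre a (by simp)
    have hb := hpre b (by simp)
    exact core_on a b offBits ha.1 ha.2 hb.1 hb.2
  · by_cases hoff : offBits.length = 2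
    · obtain ⟨a, b, rfl⟩ := List.length_eq_two.mp hoff
      simp only [Pre_isHexCaseFive, hon, hoff, if_true, if_false] at hpre
      have ha := hpre a (by simp)
      have hb := hpre b (by simp)
      exact core_off a b onBits hon ha.1 ha.2 hb.1 hb.2
    · have hon' : (onBits.length == 2) = false := by simpa using hon
      have hoff' : (offBits.length == 2) = false := by simpa using hoff
      simp [isHexCaseFive, isHexCaseFive_alt, hon', hoff']
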